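-- pv_equiv track=rewrite | github.com/Zhilin123/personal_attributes | model/generator_dataset.py | get_start_end_pos
-- ===== SOURCE A (Python) =====
-- def get_start_end_pos(text, triple, system="dygiepp"):
--     text_split = text.split()
--     head_split = triple[0].split()
--     tail_split = triple[2].split()
--
--     head_pos = None
--     tail_pos = None
--     for i in range(len(text_split)-len(head_split)):
--         if text_split[i:i+len(head_split)] == head_split and head_pos is None:
--             head_pos = (i, i+len(head_split))
--         elif text_split[i:i+len(tail_split)] == tail_split and tail_pos is None:
--             tail_pos = (i, i+len(tail_split))
--
--     if head_pos and tail_pos: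
--         if system in ["dygiepp", "nyt", "nyt_inference"]:
--             return head_pos[0], head_pos[1]-1, tail_pos[0], tail_pos[1]-1
--         else:
--             return head_pos[0], head_pos[1], tail_pos[0], tail_pos[1]
--     else:
--         return None, None, None, None
-- ===== SOURCE B (Python) =====
-- def get_start_end_pos(text, triple, system="dygiepp"):
--     words = text.split()
--     head = triple[0].split()
--     tail = triple[2].split()
--
--     def first_match(pat):
--         # first token-aligned occurrence of pat in words
--         if not pat:
--             return 0
--         m = len(pat)
--         for i in range(len(words) - m + 1):
--             if words[i] == pat[0] and words[i:i + m] == pat: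
--                 return i
--         return None
--
--     h = first_match(head)
--     t = first_match(tail)
--     if h is None or t is None:
--         return None, None, None, None
--     if system in ["dygiepp", "nyt", "nyt_inference"]:
--         return h, h + len(head) - 1, t, t + len(tail) - 1
--     return h, h + len(head), t, t + len(tail)
-- ===== Notes on version B (the rewrite author's own statement) =====
-- stated objective: alternative
-- what changed: A's single fused scan over a head-bounded range, slice-comparing both patterns at every index with two Option accumulators and an if/elif, is replaced by a first_match helper run independently for head and tail, each over its own full valid range with a first-token check before the slice comparison; Pre_ excludes only triples of fewer than 3 strings, on which A raises IndexError.
-- intended difference: On inputs where the tail pattern occurs but A's loop quirks lose a match — the head fits only at the last valid index (A's range stops one short), or the first tail occurrence is at A's head-match index (skipped by the elif) or beyond A's head-bounded range — A returns (None, None, None, None) or a later tail position, while B returns the actual first occurrences of both patterns, which is what the function is for. — e.g. on get_start_end_pos("a b", ["b", "r", "a"], "dygiepp"): A returns [none, none, none, none], B returns [some 1, some 1, some 0, some 0]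
import Mathlib
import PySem

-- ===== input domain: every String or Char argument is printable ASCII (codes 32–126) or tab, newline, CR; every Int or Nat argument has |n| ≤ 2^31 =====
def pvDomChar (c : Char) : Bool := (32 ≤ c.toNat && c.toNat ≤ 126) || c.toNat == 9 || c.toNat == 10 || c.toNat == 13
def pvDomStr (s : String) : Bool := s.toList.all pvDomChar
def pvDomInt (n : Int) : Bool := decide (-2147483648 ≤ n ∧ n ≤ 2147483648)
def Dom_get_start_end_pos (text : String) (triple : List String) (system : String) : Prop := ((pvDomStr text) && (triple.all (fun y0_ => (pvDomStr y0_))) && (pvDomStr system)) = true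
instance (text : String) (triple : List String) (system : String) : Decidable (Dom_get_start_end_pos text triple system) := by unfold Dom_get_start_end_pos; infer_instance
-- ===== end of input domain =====

-- B replaces A's single fused scan (slice-comparing both patterns at every index of a
-- head-bounded range, with two Option accumulators and an if/elif) by two independent
-- first-occurrence searches over each pattern's own full valid range; on the exceptional
-- inputs D_ below, where A's range/elif quirks lose a match, B returns the intended
-- positions and the difference is stated and proved.

-- ===== PORT A =====
-- text_split[i:i+len(pat)] == pat  (A's inline slice comparison)
def pvMatchAt (words pat : List String) (i : Int) : Bool :=
  PySem.List.slice words (some i) (some (i + (pat.length : Int))) == pat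

-- one iteration of A's for-loop: state = (head_pos, tail_pos)
def pvStepA (words head tail : List String) (st : Option (Int × Int) × Option (Int × Int))
    (i : Int) : Option (Int × Int) × Option (Int × Int) :=
  if pvMatchAt words head i = true ∧ st.1 = none then (some (i, i + (head.length : Int)), st.2)
  else if pvMatchAt words tail i = true ∧ st.2 = none then (st.1, some (i, i + (tail.length : Int)))
  else st

-- A's loop and return, on the three token lists
def pvRunA (ws hd tl : List String) (sys : String) : List (Option Int) :=
  match (PySem.List.pyRange 0 ((ws.length : Int) - (hd.length : Int))).foldl
      (pvStepA ws hd tl) (none, none) with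
  | (some hp, some tp) =>
      if sys = "dygiepp" ∨ sys = "nyt" ∨ sys = "nyt_inference" then
        [some hp.1, some (hp.2 - 1), some tp.1, some (tp.2 - 1)]
      else [some hp.1, some hp.2, some tp.1, some tp.2]
  | _ => [none, none, none, none]

def get_start_end_pos (text : String) (triple : List String) (system : String) : List (Option Int) :=
  pvRunA (PySem.Str.split₀ text)
    (PySem.Str.split₀ (PySem.List.pyGetD triple 0 ""))   -- triple[0]; in range under Pre_
    (PySem.Str.split₀ (PySem.List.pyGetD triple 2 ""))   -- triple[2]; in range under Pre_
    system

-- ===== PORT B =====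
-- first_match of Source B: scan range(len(words)-m+1), check first token, then words[i:i+m] == pat
def pvFirstMatchB (ws pat : List String) : Option Int :=
  match pat with
  | [] => some 0
  | p0 :: _ =>
      (PySem.List.pyRange 0 ((ws.length : Int) - (pat.length : Int) + 1)).find?
        (fun i => (PySem.List.pyGetD ws i "" == p0) &&
          (PySem.List.slice ws (some i) (some (i + (pat.length : Int))) == pat))

def pvRunB (ws hd tl : List String) (sys : String) : List (Option Int) :=
  let h := pvFirstMatchB ws hd
  let t := pvFirstMatchB ws tl
  if h = none ∨ t = none then [none, none, none, none]
  else if sys = "dygiepp" ∨ sys = "nyt" ∨ sys = "nyt_inference" then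
    [h, h.map (fun x => x + (hd.length : Int) - 1), t, t.map (fun x => x + (tl.length : Int) - 1)]
  else
    [h, h.map (fun x => x + (hd.length : Int)), t, t.map (fun x => x + (tl.length : Int))]

def get_start_end_pos_alt (text : String) (triple : List String) (system : String) :
    List (Option Int) :=
  pvRunB (PySem.Str.split₀ text)
    (PySem.Str.split₀ (PySem.List.pyGetD triple 0 ""))   -- triple[0]; in range under Pre_
    (PySem.Str.split₀ (PySem.List.pyGetD triple 2 ""))   -- triple[2]; in range under Pre_
    system

-- ===== PRECONDITION & SPEC =====
-- Pre_ excludes only triples of fewer than 3 strings, on which both Pythons raise IndexError.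
def Pre_get_start_end_pos (text : String) (triple : List String) (system : String) : Prop :=
  3 ≤ triple.length
instance (text : String) (triple : List String) (system : String) :
    Decidable (Pre_get_start_end_pos text triple system) := by
  unfold Pre_get_start_end_pos; infer_instance

def pvWitness_get_start_end_pos : String × List String × String :=
  ("a b c", ["a", "likes", "c"], "dygiepp")

-- "p occurs in w at token index i" (used only to state D_)
def pvOccAt (w p : List String) (i : Nat) : Prop := p <+: w.drop i

-- the token list the Pythons search (text.split / triple[k].split)
def pvToks (s : String) : List String := PySem.Str.split₀ s

-- D_: inputs where A's loop quirks lose a match — the head pattern fits only at the last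
-- possible index (A's range stops one short), or the first tail occurrence lies at A's
-- head-match index (skipped by the elif) or beyond A's head-bounded range — there A returns
-- (None,None,None,None) or a later tail position, while B returns the actual first
-- occurrences of both patterns, which is what the function is for.
def pvLostMatch (w p q : List String) : Prop :=
  q <:+: w ∧ p <:+: w ∧
  ((¬ ∃ i < w.length - p.length, pvOccAt w p i) ∨
    ∃ i < w.length + 1, pvOccAt w q i ∧ (∀ j < i, ¬ pvOccAt w q j) ∧
      (w.length - p.length ≤ i ∨ (pvOccAt w p i ∧ ∀ j < i, ¬ pvOccAt w p j)))

def D_get_start_end_pos (text : String) (triple : List String) (system : String) : Prop :=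
  pvLostMatch (pvToks text) (pvToks (triple.getD 0 "")) (pvToks (triple.getD 2 ""))
instance (text : String) (triple : List String) (system : String) :
    Decidable (D_get_start_end_pos text triple system) := by
  unfold D_get_start_end_pos pvLostMatch pvToks pvOccAt; infer_instance

def Spec_get_start_end_pos (text : String) (triple : List String) (system : String) (out : List (Option Int)) : Prop := ¬ D_get_start_end_pos text triple system → out = get_start_end_pos_alt text triple system
instance (text : String) (triple : List String) (system : String) (out : List (Option Int)) : Decidable (Spec_get_start_end_pos text triple system out) := by unfold Spec_get_start_end_pos; infer_instance

def pvDiffWitness_get_start_end_pos : String × List String × String :=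
  ("a b", ["b", "r", "a"], "dygiepp")
def pvDiffWitnessOut_get_start_end_pos : (List (Option Int)) × (List (Option Int)) :=
  ([none, none, none, none], [some 1, some 1, some 0, some 0])

-- ===== CLAIM (what is proved, stated in full; the proofs are below) =====
def Claim_unchanged_get_start_end_pos : Prop := ∀ (text : String) (triple : List String) (system : String), Dom_get_start_end_pos text triple system → Pre_get_start_end_pos text triple system → Spec_get_start_end_pos text triple system (get_start_end_pos text triple system)
def Claim_changed_get_start_end_pos : Prop := Dom_get_start_end_pos (pvDiffWitness_get_start_end_pos.1) (pvDiffWitness_get_start_end_pos.2.1) (pvDiffWitness_get_start_end_pos.2.2) ∧ Pre_get_start_end_pos (pvDiffWitness_get_start_end_pos.1) (pvDiffWitness_get_start_end_pos.2.1) (pvDiffWitness_get_start_end_pos.2.2) ∧ D_get_start_end_pos (pvDiffWitness_get_start_end_pos.1) (pvDiffWitness_get_start_end_pos.2.1) (pvDiffWitness_get_start_end_pos.2.2) ∧ get_start_end_pos (pvDiffWitness_get_start_end_pos.1) (pvDiffWitness_get_start_end_pos.2.1) (pvDiffWitness_get_start_end_pos.2.2) = pvDiffWitnessOut_get_start_end_pos.1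 ∧ get_start_end_pos_alt (pvDiffWitness_get_start_end_pos.1) (pvDiffWitness_get_start_end_pos.2.1) (pvDiffWitness_get_start_end_pos.2.2) = pvDiffWitnessOut_get_start_end_pos.2 ∧ pvDiffWitnessOut_get_start_end_pos.1 ≠ pvDiffWitnessOut_get_start_end_pos.2

def Claim_exact_get_start_end_pos : Prop := ∀ (text : String) (triple : List String) (system : String), Dom_get_start_end_pos text triple system → Pre_get_start_end_pos text triple system → D_get_start_end_pos text triple system → get_start_end_pos text triple system ≠ get_start_end_pos_alt text triple system

-- ===== LEMMAS AND PROOFS =====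

-- Bool twin of pvOccAt carrying the fit condition (for the find? machinery)
def pvOccB (ws pat : List String) (i : Nat) : Bool :=
  decide (i + pat.length ≤ ws.length) && decide ((ws.drop i).take pat.length = pat)

theorem pvOccB_iff (ws pat : List String) (i : Nat) (hi : i ≤ ws.length) :
    pvOccB ws pat i = true ↔ pvOccAt ws pat i := by
  unfold pvOccB pvOccAt
  rw [List.prefix_iff_eq_take]
  simp only [Bool.and_eq_true, decide_eq_true_eq]
  constructor
  · rintro ⟨_, h⟩; exact h.symm
  · intro h
    refine ⟨?_, h.symm⟩
    have hlen := congrArg List.length h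
    simp only [List.length_take, List.length_drop] at hlen
    omega

theorem pvOccB_infix (ws pat : List String) (i : Nat) (h : pvOccB ws pat i = true) :
    pat <:+: ws := by
  unfold pvOccB at h
  simp only [Bool.and_eq_true, decide_eq_true_eq] at h
  obtain ⟨hle, heq⟩ := h
  rw [← heq]
  exact ((List.take_prefix _ _).isInfix).trans (List.drop_suffix _ _).isInfix

theorem pvInfix_occB (ws pat : List String) (h : pat <:+: ws) :
    ∃ i, pvOccB ws pat i = true := by
  obtain ⟨s, t, heq⟩ := h
  refine ⟨s.length, ?_⟩
  unfold pvOccB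
  simp only [Bool.and_eq_true, decide_eq_true_eq]
  subst heq
  constructor
  · simp only [List.length_append]
    omega
  · rw [List.append_assoc, List.drop_left, List.take_left]

theorem pv_find?_congr {α : Type} {p q : α → Bool} :
    ∀ {l : List α}, (∀ x ∈ l, p x = q x) → l.find? p = l.find? q := by
  intro l
  induction l with
  | nil => intro _; rfl
  | cons a l ih =>
      intro h
      have ha := h a (by simp)
      by_cases hp : p a = true
      · rw [List.find?_cons_of_pos hp, List.find?_cons_of_pos (ha ▸ hp)]
      · rw [List.find?_cons_of_neg hp,
          List.find?_cons_of_neg (by rw [← ha]; exact hp),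
          ih (fun x hx => h x (by simp [hx]))]

theorem pvFindRange_none_iff (q : Nat → Bool) (b : Nat) :
    ((List.range b).find? q = none) ↔ ∀ i, i < b → q i = false := by
  rw [List.find?_eq_none]
  constructor
  · intro h i hi
    have := h i (List.mem_range.mpr hi)
    simpa using this
  · intro h x hx
    simp [h x (List.mem_range.mp hx)]

theorem pvFindRange_some_iff (q : Nat → Bool) :
    ∀ (b i : Nat), ((List.range b).find? q = some i) ↔
      (i < b ∧ q i = true ∧ ∀ j, j < i → q j = false) := by
  intro b
  induction b with
  | zero => intro i; simp
  | succ b ih =>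
      intro i
      rw [List.range_succ, List.find?_append]
      cases hfb : (List.range b).find? q with
      | some a =>
          simp only [Option.some_or]
          rcases (ih a).mp hfb with ⟨hab, hq, hmin⟩
          constructor
          · intro h
            injection h with h
            subst h
            exact ⟨by omega, hq, hmin⟩
          · rintro ⟨hi, hqi, hmini⟩
            have h1 : ¬ a < i := fun hlt => by
              have := hmini a hlt; rw [hq] at this; cases this
            have h2 : ¬ i < a := fun hlt => by
              have := hmin i hlt; rw [hqi] at this; cases this
            have : a = i := by omega
            rw [this]
      | none =>
          simp only [Option.none_or]
          have hall : ∀ j, j < b → q j = false := (pvFindRange_none_iff q b).mp hfb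
          by_cases hqb : q b = true
          · rw [List.find?_cons_of_pos hqb]
            constructor
            · intro h
              injection h with h
              subst h
              exact ⟨Nat.lt_succ_self _, hqb, hall⟩
            · rintro ⟨hi, hqi, hmini⟩
              have : ¬ i < b := fun hlt => by
                have := hall i hlt; rw [hqi] at this; cases this
              have : i = b := by omega
              rw [this]
          · rw [List.find?_cons_of_neg hqb, List.find?_nil]
            constructor
            · intro h; cases h
            · rintro ⟨hi, hqi, hmini⟩
              exfalso
              by_cases hib : i < b
              · have := hall i hib; rw [hqi] at this; cases this
              · have : i = b := by omega
                subst this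
                exact hqb hqi

theorem pvFindRange_mono (q : Nat → Bool) (b b' i : Nat) (hbb : b ≤ b')
    (h : (List.range b).find? q = some i) : (List.range b').find? q = some i := by
  rcases (pvFindRange_some_iff q b i).mp h with ⟨hi, hq, hmin⟩
  exact (pvFindRange_some_iff q b' i).mpr ⟨by omega, hq, hmin⟩

theorem pvOccB_bound (ws pat : List String) (i : Nat) (h : pvOccB ws pat i = true) :
    i + pat.length ≤ ws.length := by
  unfold pvOccB at h
  simp only [Bool.and_eq_true, decide_eq_true_eq] at h
  exact h.1

theorem pvSliceBeq_eq_occB (ws pat : List String) (i : Nat) (hi : i ≤ ws.length) :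
    (PySem.List.slice ws (some (i : Int)) (some ((i : Int) + (pat.length : Int))) == pat)
      = pvOccB ws pat i := by
  unfold pvOccB
  rw [PySem.List.slice_natCast_add]
  by_cases hle : i + pat.length ≤ ws.length
  · apply Bool.eq_iff_iff.mpr
    simp [hle]
  · apply Bool.eq_iff_iff.mpr
    simp only [beq_iff_eq, Bool.and_eq_true, decide_eq_true_eq]
    constructor
    · intro heq
      exfalso
      have hlen := congrArg List.length heq
      simp only [List.length_take, List.length_drop] at hlen
      omega
    · rintro ⟨h1, _⟩
      exact absurd h1 hle

theorem pvMatchAt_eq_occB (ws pat : List String) (i : Nat) (hi : i ≤ ws.length) :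
    pvMatchAt ws pat (i : Int) = pvOccB ws pat i := by
  unfold pvMatchAt
  exact pvSliceBeq_eq_occB ws pat i hi

theorem pvOcc_firstTok (ws : List String) (p0 : String) (pr : List String) (i : Nat)
    (h : pvOccB ws (p0 :: pr) i = true) :
    (PySem.List.pyGetD ws (i : Int) "" == p0) = true := by
  unfold pvOccB at h
  simp only [Bool.and_eq_true, decide_eq_true_eq] at h
  obtain ⟨hle, heq⟩ := h
  have hh : (List.take (p0 :: pr).length (List.drop i ws)).head? = some p0 := by
    rw [heq]; rfl
  rw [List.head?_take] at hh
  simp only [List.length_cons, Nat.succ_ne_zero, if_false, List.head?_drop] at hh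
  rw [PySem.List.pyGetD_natCast]
  simp [List.getD_eq_getElem?_getD, hh]

theorem pvFind_pyRange (b : Int) (p : Int → Bool) :
    (PySem.List.pyRange 0 b).find? p
      = ((List.range b.toNat).find? (fun k : Nat => p (k : Int))).map (fun k : Nat => (k : Int)) := by
  have h1 : PySem.List.pyRange 0 b = (List.range b.toNat).map (fun k : Nat => (k : Int)) := by
    rw [PySem.List.pyRange_one]
    simp only [Int.sub_zero, zero_add]
  rw [h1, List.find?_map]
  rfl

theorem pvBeqMapCast (o : Option Nat) (k : Nat) :
    ((o.map (fun k : Nat => (k : Int))) == some (k : Int)) = (o == some k) := by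
  cases o with
  | none => rfl
  | some a =>
      apply Bool.eq_iff_iff.mpr
      simp

-- ----- A-side loop characterisation -----

theorem pvFoldA_some_left (w hd tl : List String) (h : Int × Int) :
    ∀ (L : List Int) (tp : Option (Int × Int)),
      L.foldl (pvStepA w hd tl) (some h, tp)
        = (some h, tp.or ((L.find? (pvMatchAt w tl)).map (fun i => (i, i + (tl.length : Int))))) := by
  intro L
  induction L with
  | nil => intro tp; cases tp <;> simp
  | cons a L ih =>
      intro tp
      by_cases hm : pvMatchAt w tl a = true
      · cases tp with
        | none => simp [pvStepA, hm, List.find?_cons_of_pos, ih]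
        | some t => simp [pvStepA, hm, ih]
      · simp only [List.foldl_cons]
        rw [List.find?_cons_of_neg (by simpa using hm)]
        have : pvStepA w hd tl (some h, tp) a = (some h, tp) := by
          simp [pvStepA, hm]
        rw [this, ih]

theorem pvFoldA_none_some (w hd tl : List String) :
    ∀ (L : List Int) (t : Int × Int),
      L.foldl (pvStepA w hd tl) (none, some t)
        = ((L.find? (pvMatchAt w hd)).map (fun i => (i, i + (hd.length : Int))), some t) := by
  intro L
  induction L with
  | nil => intro t; simp
  | cons a L ih =>
      intro t
      by_cases hm : pvMatchAt w hd a = true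
      · simp only [List.foldl_cons]
        have : pvStepA w hd tl (none, some t) a = (some (a, a + (hd.length : Int)), some t) := by
          simp [pvStepA, hm]
        rw [this, pvFoldA_some_left, List.find?_cons_of_pos hm]
        simp
      · simp only [List.foldl_cons]
        have : pvStepA w hd tl (none, some t) a = (none, some t) := by
          simp [pvStepA, hm]
        rw [this, ih, List.find?_cons_of_neg (by simpa using hm)]

theorem pvFoldA_none_none (w hd tl : List String) :
    ∀ (L : List Int), L.Nodup →
      L.foldl (pvStepA w hd tl) (none, none)
        = ((L.find? (pvMatchAt w hd)).map (fun i => (i, i + (hd.length : Int))),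
           (L.find? (fun i => pvMatchAt w tl i && !(L.find? (pvMatchAt w hd) == some i))).map
             (fun i => (i, i + (tl.length : Int)))) := by
  intro L
  induction L with
  | nil => intro _; simp
  | cons a L ih =>
      intro hnd
      have ha : a ∉ L := (List.nodup_cons.mp hnd).1
      have hLnd : L.Nodup := (List.nodup_cons.mp hnd).2
      by_cases hmh : pvMatchAt w hd a = true
      · simp only [List.foldl_cons]
        have : pvStepA w hd tl (none, none) a = (some (a, a + (hd.length : Int)), none) := by
          simp [pvStepA, hmh]
        rw [this, pvFoldA_some_left, List.find?_cons_of_pos hmh]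
        have hfind : List.find?
              (fun i => pvMatchAt w tl i && !((some a : Option Int) == some i)) (a :: L)
            = List.find?
              (fun i => pvMatchAt w tl i && !((some a : Option Int) == some i)) L :=
          List.find?_cons_of_neg (by simp)
        have hcongr : (L.find? (fun i => pvMatchAt w tl i && !((some a : Option Int) == some i)))
            = L.find? (pvMatchAt w tl) := by
          apply pv_find?_congr
          intro x hx
          have hxa : x ≠ a := fun e => ha (e ▸ hx)
          simp [Ne.symm hxa]
        rw [hfind, hcongr]
        simp
      · by_cases hmt : pvMatchAt w tl a = true
        · simp only [List.foldl_cons]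
          have : pvStepA w hd tl (none, none) a = (none, some (a, a + (tl.length : Int))) := by
            simp [pvStepA, hmh, hmt]
          rw [this, pvFoldA_none_some, List.find?_cons_of_neg (by simpa using hmh)]
          have hne : L.find? (pvMatchAt w hd) ≠ some a := by
            intro e
            exact ha (List.mem_of_find?_eq_some e)
          have hpa : (fun i => pvMatchAt w tl i && !(L.find? (pvMatchAt w hd) == some i)) a
              = true := by
            show (pvMatchAt w tl a && !(L.find? (pvMatchAt w hd) == some a)) = true
            rw [hmt, Bool.true_and, Bool.not_eq_true', beq_eq_false_iff_ne]
            exact hne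
          have hfind : List.find?
              (fun i => pvMatchAt w tl i && !(L.find? (pvMatchAt w hd) == some i)) (a :: L)
              = some a := List.find?_cons_of_pos hpa
          rw [hfind]
          simp
        · simp only [List.foldl_cons]
          have : pvStepA w hd tl (none, none) a = (none, none) := by
            simp [pvStepA, hmh, hmt]
          have hcons : (a :: L).find? (pvMatchAt w hd) = L.find? (pvMatchAt w hd) :=
            List.find?_cons_of_neg (by simp [hmh])
          have hfind : List.find? (fun i => pvMatchAt w tl i
                && !((a :: L).find? (pvMatchAt w hd) == some i)) (a :: L)
              = List.find? (fun i => pvMatchAt w tl i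
                && !((a :: L).find? (pvMatchAt w hd) == some i)) L :=
            List.find?_cons_of_neg (by simp [hmt])
          rw [this, ih hLnd, hfind, hcons]

-- ----- B-side characterisation -----

theorem pvFirstMatchB_eq (ws pat : List String) :
    pvFirstMatchB ws pat
      = ((List.range ((ws.length : Int) - (pat.length : Int) + 1).toNat).find?
          (fun i => pvOccB ws pat i)).map (fun k : Nat => (k : Int)) := by
  cases pat with
  | nil =>
      unfold pvFirstMatchB
      have hb : (((ws.length : Int)) - ((List.length ([] : List String) : Int)) + 1).toNat
          = ws.length + 1 := by
        simp
      rw [hb, List.range_succ_eq_map]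
      rw [List.find?_cons_of_pos (by unfold pvOccB; simp)]
      rfl
  | cons p0 pr =>
      show (PySem.List.pyRange 0 ((ws.length : Int) - ((p0 :: pr).length : Int) + 1)).find?
          (fun i => (PySem.List.pyGetD ws i "" == p0) &&
            (PySem.List.slice ws (some i) (some (i + ((p0 :: pr).length : Int))) == (p0 :: pr))) = _
      rw [pvFind_pyRange]
      apply congrArg
      apply pv_find?_congr
      intro k hk
      have hlen : (p0 :: pr).length = pr.length + 1 := rfl
      have hkle : k ≤ ws.length := by
        have := List.mem_range.mp hk
        omega
      have hm := pvSliceBeq_eq_occB ws (p0 :: pr) k hkle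
      rw [hm]
      by_cases hocc : pvOccB ws (p0 :: pr) k = true
      · rw [hocc, pvOcc_firstTok ws p0 pr k hocc]
        rfl
      · simp only [Bool.not_eq_true] at hocc
        rw [hocc, Bool.and_false]

-- ----- main equivalence outside D_ -----

theorem pvMain (ws hd tl : List String) (sys : String)
    (hD : ¬ pvLostMatch ws hd tl) :
    pvRunA ws hd tl sys = pvRunB ws hd tl sys := by
  unfold pvLostMatch at hD
  -- canonical Nat-level searches
  have hbA : ((ws.length : Int) - (hd.length : Int)).toNat = ws.length - hd.length := by omega
  -- A's head find
  have hAh : (PySem.List.pyRange 0 ((ws.length : Int) - (hd.length : Int))).find? (pvMatchAt ws hd)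
      = ((List.range (ws.length - hd.length)).find? (fun i => pvOccB ws hd i)).map
          (fun k : Nat => (k : Int)) := by
    rw [pvFind_pyRange, hbA]
    apply congrArg
    apply pv_find?_congr
    intro k hk
    exact pvMatchAt_eq_occB ws hd k (by have := List.mem_range.mp hk; omega)
  -- A's tail find
  have hAt : (PySem.List.pyRange 0 ((ws.length : Int) - (hd.length : Int))).find?
        (fun i => pvMatchAt ws tl i &&
          !((PySem.List.pyRange 0 ((ws.length : Int) - (hd.length : Int))).find? (pvMatchAt ws hd)
            == some i))
      = ((List.range (ws.length - hd.length)).find?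
          (fun i => pvOccB ws tl i &&
            !((List.range (ws.length - hd.length)).find? (fun j => pvOccB ws hd j) == some i))).map
          (fun k : Nat => (k : Int)) := by
    simp only [hAh]
    rw [pvFind_pyRange, hbA]
    apply congrArg
    apply pv_find?_congr
    intro k hk
    rw [pvMatchAt_eq_occB ws tl k (by have := List.mem_range.mp hk; omega), pvBeqMapCast]
  unfold pvRunA pvRunB
  rw [pvFoldA_none_none ws hd tl _ (PySem.List.nodup_pyRange_one 0 _), hAt, hAh,
    pvFirstMatchB_eq ws hd, pvFirstMatchB_eq ws tl]
  set FH := (List.range (ws.length - hd.length)).find? (fun i => pvOccB ws hd i) with hFHdef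
  set FT := (List.range (ws.length - hd.length)).find?
      (fun i => pvOccB ws tl i && !(FH == some i)) with hFTdef
  set BH := (List.range ((ws.length : Int) - (hd.length : Int) + 1).toNat).find?
      (fun i => pvOccB ws hd i) with hBHdef
  set BT := (List.range ((ws.length : Int) - (tl.length : Int) + 1).toNat).find?
      (fun i => pvOccB ws tl i) with hBTdef
  by_cases htl : ∃ j, pvOccB ws tl j = true
  · obtain ⟨j1, hj1⟩ := htl
    have hj1b := pvOccB_bound ws tl j1 hj1
    -- tail has a global first occurrence j0
    have hBTsome : ∃ j0, BT = some j0 := by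
      cases hBT : BT with
      | none =>
          exfalso
          have := (pvFindRange_none_iff _ _).mp (hBTdef ▸ hBT) j1 (by omega)
          rw [hj1] at this; cases this
      | some j0 => exact ⟨j0, rfl⟩
    obtain ⟨j0, hBT⟩ := hBTsome
    rcases (pvFindRange_some_iff _ _ _).mp (hBTdef ▸ hBT) with ⟨hj0b, hj0occ, hj0min⟩
    -- D_'s first conjunct holds
    have hD2 := fun h => hD ⟨pvOccB_infix ws tl j1 hj1, h⟩
    have hj0n : j0 ≤ ws.length := by
      have := pvOccB_bound ws tl j0 hj0occ; omega
    by_cases hhA : ∃ i, i + hd.length < ws.length ∧ pvOccB ws hd i = true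
    · -- head found by A (and hence by B at the same index)
      obtain ⟨i1, hi1lt, hi1occ⟩ := hhA
      have hFHsome : ∃ i0, FH = some i0 := by
        cases hFH : FH with
        | none =>
            exfalso
            have := (pvFindRange_none_iff _ _).mp (hFHdef ▸ hFH) i1 (by omega)
            rw [hi1occ] at this; cases this
        | some i0 => exact ⟨i0, rfl⟩
      obtain ⟨i0, hFH⟩ := hFHsome
      rcases (pvFindRange_some_iff _ _ _).mp (hFHdef ▸ hFH) with ⟨hi0b, hi0occ, hi0min⟩
      have hBH : BH = some i0 := by
        rw [hBHdef]
        exact pvFindRange_mono _ _ _ _ (by omega) (hFHdef ▸ hFH)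
      have hD3 := fun h => hD2 ⟨pvOccB_infix ws hd i1 hi1occ, h⟩
      -- j0 is the first tail occurrence, in D_'s terms
      have hfirstT : pvOccAt ws tl j0 ∧ ∀ j < j0, ¬ pvOccAt ws tl j :=
        ⟨(pvOccB_iff ws tl j0 hj0n).mp hj0occ,
         fun j hj hP => by
           have hb := (pvOccB_iff ws tl j (by omega)).mpr hP
           rw [hj0min j hj] at hb; cases hb⟩
      -- from ¬D: the first tail occurrence is reachable for A and not at the head index
      have hnsec : ¬ (ws.length - hd.length ≤ j0 ∨
          (pvOccAt ws hd j0 ∧ ∀ j < j0, ¬ pvOccAt ws hd j)) := by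
        intro hor
        exact hD3 (Or.inr ⟨j0, by omega, hfirstT.1, hfirstT.2, hor⟩)
      push_neg at hnsec
      obtain ⟨hj0lt, hnotHd⟩ := hnsec
      have hj0ne : j0 ≠ i0 := by
        intro heq
        obtain ⟨j, hj, hOj⟩ := hnotHd ((pvOccB_iff ws hd j0 hj0n).mp (heq ▸ hi0occ))
        have hb := (pvOccB_iff ws hd j (by omega)).mpr hOj
        rw [hi0min j (heq ▸ hj)] at hb; cases hb
      -- hence A's excluded tail search also returns j0
      have hFT : FT = some j0 := by
        rw [hFTdef]
        apply (pvFindRange_some_iff _ _ _).mpr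
        refine ⟨hj0lt, ?_, ?_⟩
        · rw [hj0occ, hFH]
          simp [Ne.symm hj0ne]
        · intro j hj
          rw [hj0min j hj]
          simp
      rw [hFH, hFT, hBH, hBT]
      have hi0h : i0 + hd.length ≤ ws.length := pvOccB_bound ws hd i0 hi0occ
      by_cases hsys : sys = "dygiepp" ∨ sys = "nyt" ∨ sys = "nyt_inference" <;>
        simp [hsys]
    · -- head nowhere inside A's range: both sides return the all-None row
      have hFH : FH = none := by
        rw [hFHdef]
        apply (pvFindRange_none_iff _ _).mpr
        intro i hi
        by_contra hcon
        simp only [Bool.not_eq_false] at hcon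
        exact hhA ⟨i, by omega, hcon⟩
      have hBH : BH = none := by
        rw [hBHdef]
        apply (pvFindRange_none_iff _ _).mpr
        intro i hi
        by_contra hcon
        simp only [Bool.not_eq_false] at hcon
        -- ¬D forces no head match at the boundary either
        apply hD2
        refine ⟨pvOccB_infix ws hd i hcon, Or.inl ?_⟩
        rintro ⟨i', hi'lt, hocc⟩
        exact hhA ⟨i', by omega, (pvOccB_iff ws hd i' (by omega)).mpr hocc⟩
      rw [hFH, hBH]
      cases FT <;> simp
  · -- no tail occurrence anywhere: both sides return the all-None row
    push_neg at htl
    have hFT : FT = none := by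
      rw [hFTdef]
      apply (pvFindRange_none_iff _ _).mpr
      intro i hi
      have := htl i
      simp only [Bool.not_eq_true] at this
      rw [this]
      simp
    have hBT : BT = none := by
      rw [hBTdef]
      apply (pvFindRange_none_iff _ _).mpr
      intro i hi
      have := htl i
      simp only [Bool.not_eq_true] at this
      exact this
    rw [hFT, hBT]
    cases FH <;> simp

-- A ≠ B everywhere inside the change region
theorem pvMainNe (ws hd tl : List String) (sys : String)
    (hD : pvLostMatch ws hd tl) :
    pvRunA ws hd tl sys ≠ pvRunB ws hd tl sys := by
  unfold pvLostMatch at hD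
  obtain ⟨hqinf, hpinf, hD3⟩ := hD
  have hbA : ((ws.length : Int) - (hd.length : Int)).toNat = ws.length - hd.length := by omega
  have hAh : (PySem.List.pyRange 0 ((ws.length : Int) - (hd.length : Int))).find? (pvMatchAt ws hd)
      = ((List.range (ws.length - hd.length)).find? (fun i => pvOccB ws hd i)).map
          (fun k : Nat => (k : Int)) := by
    rw [pvFind_pyRange, hbA]
    apply congrArg
    apply pv_find?_congr
    intro k hk
    exact pvMatchAt_eq_occB ws hd k (by have := List.mem_range.mp hk; omega)
  have hAt : (PySem.List.pyRange 0 ((ws.length : Int) - (hd.length : Int))).find?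
        (fun i => pvMatchAt ws tl i &&
          !((PySem.List.pyRange 0 ((ws.length : Int) - (hd.length : Int))).find? (pvMatchAt ws hd)
            == some i))
      = ((List.range (ws.length - hd.length)).find?
          (fun i => pvOccB ws tl i &&
            !((List.range (ws.length - hd.length)).find? (fun j => pvOccB ws hd j) == some i))).map
          (fun k : Nat => (k : Int)) := by
    simp only [hAh]
    rw [pvFind_pyRange, hbA]
    apply congrArg
    apply pv_find?_congr
    intro k hk
    rw [pvMatchAt_eq_occB ws tl k (by have := List.mem_range.mp hk; omega), pvBeqMapCast]
  unfold pvRunA pvRunB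
  rw [pvFoldA_none_none ws hd tl _ (PySem.List.nodup_pyRange_one 0 _), hAt, hAh,
    pvFirstMatchB_eq ws hd, pvFirstMatchB_eq ws tl]
  set FH := (List.range (ws.length - hd.length)).find? (fun i => pvOccB ws hd i) with hFHdef
  set FT := (List.range (ws.length - hd.length)).find?
      (fun i => pvOccB ws tl i && !(FH == some i)) with hFTdef
  set BH := (List.range ((ws.length : Int) - (hd.length : Int) + 1).toNat).find?
      (fun i => pvOccB ws hd i) with hBHdef
  set BT := (List.range ((ws.length : Int) - (tl.length : Int) + 1).toNat).find?
      (fun i => pvOccB ws tl i) with hBTdef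
  -- B finds both patterns
  obtain ⟨k1, hk1⟩ := pvInfix_occB ws hd hpinf
  have hk1b := pvOccB_bound ws hd k1 hk1
  have hBHsome : ∃ i0, BH = some i0 := by
    cases hBH : BH with
    | none =>
        exfalso
        have := (pvFindRange_none_iff _ _).mp (hBHdef ▸ hBH) k1 (by omega)
        rw [hk1] at this; cases this
    | some i0 => exact ⟨i0, rfl⟩
  obtain ⟨i0, hBH⟩ := hBHsome
  rcases (pvFindRange_some_iff _ _ _).mp (hBHdef ▸ hBH) with ⟨hi0b, hi0occ, hi0min⟩
  have hi0n : i0 ≤ ws.length := by have := pvOccB_bound ws hd i0 hi0occ; omega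
  obtain ⟨j1, hj1⟩ := pvInfix_occB ws tl hqinf
  have hj1b := pvOccB_bound ws tl j1 hj1
  have hBTsome : ∃ j0, BT = some j0 := by
    cases hBT : BT with
    | none =>
        exfalso
        have := (pvFindRange_none_iff _ _).mp (hBTdef ▸ hBT) j1 (by omega)
        rw [hj1] at this; cases this
    | some j0 => exact ⟨j0, rfl⟩
  obtain ⟨j0, hBT⟩ := hBTsome
  rcases (pvFindRange_some_iff _ _ _).mp (hBTdef ▸ hBT) with ⟨hj0b, hj0occ, hj0min⟩
  have hj0n : j0 ≤ ws.length := by have := pvOccB_bound ws tl j0 hj0occ; omega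
  rw [hBH, hBT]
  cases hD3 with
  | inl hnHB =>
      -- head fits only at the boundary: A never sees it
      have hFH : FH = none := by
        rw [hFHdef]
        apply (pvFindRange_none_iff _ _).mpr
        intro i hi
        by_contra hcon
        simp only [Bool.not_eq_false] at hcon
        exact hnHB ⟨i, hi, (pvOccB_iff ws hd i (by omega)).mp hcon⟩
      rw [hFH]
      cases FT <;>
        (by_cases hsys : sys = "dygiepp" ∨ sys = "nyt" ∨ sys = "nyt_inference" <;> simp [hsys])
  | inr hsec =>
      obtain ⟨jj, hjjn, hjjocc, hjjmin, hor⟩ := hsec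
      have hjj : jj = j0 := by
        by_contra hne
        rcases Nat.lt_or_ge jj j0 with hlt | hge
        · have hz := hj0min jj hlt
          have hb := (pvOccB_iff ws tl jj (by omega)).mpr hjjocc
          rw [hz] at hb; cases hb
        · exact hjjmin j0 (by omega) ((pvOccB_iff ws tl j0 hj0n).mp hj0occ)
      subst hjj
      cases hor with
      | inl hge =>
          -- first tail occurrence beyond A's head-bounded range
          have hFT : FT = none := by
            rw [hFTdef]
            apply (pvFindRange_none_iff _ _).mpr
            intro i hi
            have hz : pvOccB ws tl i = false := hj0min i (by omega)
            simp [hz]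
          rw [hFT]
          cases FH <;>
            (by_cases hsys : sys = "dygiepp" ∨ sys = "nyt" ∨ sys = "nyt_inference" <;> simp [hsys])
      | inr hfh =>
          obtain ⟨hOhj0, hminHd⟩ := hfh
          have hOB : pvOccB ws hd jj = true := (pvOccB_iff ws hd jj (by omega)).mpr hOhj0
          have hi0eq : i0 = jj := by
            by_contra hne
            rcases Nat.lt_or_ge i0 jj with hlt | hge
            · exact hminHd i0 hlt ((pvOccB_iff ws hd i0 hi0n).mp hi0occ)
            · have hb := hi0min jj (by omega)
              rw [hOB] at hb; cases hb
          subst hi0eq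
          by_cases hblt : i0 < ws.length - hd.length
          · -- A's head is also the first tail index: the elif skips it
            have hFH : FH = some i0 := by
              rw [hFHdef]
              apply (pvFindRange_some_iff _ _ _).mpr
              refine ⟨hblt, hOB, ?_⟩
              intro j hj
              by_contra hb
              simp only [Bool.not_eq_false] at hb
              exact hminHd j hj ((pvOccB_iff ws hd j (by omega)).mp hb)
            rw [hFH]
            cases hFT : FT with
            | none =>
                by_cases hsys : sys = "dygiepp" ∨ sys = "nyt" ∨ sys = "nyt_inference" <;>
                  simp [hsys]
            | some j2 =>
                rcases (pvFindRange_some_iff _ _ _).mp (hFTdef ▸ hFT) with ⟨hj2b, hj2p, hj2min⟩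
                have hne : j2 ≠ i0 := by
                  rw [hFH] at hj2p
                  simp only [Bool.and_eq_true, Bool.not_eq_true', beq_eq_false_iff_ne] at hj2p
                  exact fun e => hj2p.2 (congrArg some e.symm)
                by_cases hsys : sys = "dygiepp" ∨ sys = "nyt" ∨ sys = "nyt_inference" <;>
                  simp [hsys, hne]
          · -- first head occurrence is itself outside A's range
            have hFH : FH = none := by
              rw [hFHdef]
              apply (pvFindRange_none_iff _ _).mpr
              intro i hi
              by_contra hb
              simp only [Bool.not_eq_false] at hb
              exact hminHd i (by omega) ((pvOccB_iff ws hd i (by omega)).mp hb)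
            rw [hFH]
            cases FT <;>
              (by_cases hsys : sys = "dygiepp" ∨ sys = "nyt" ∨ sys = "nyt_inference" <;>
                simp [hsys])

-- ===== VERDICT (by name: the statement is the Claim_ definition above) =====
theorem get_start_end_pos_spec : Claim_unchanged_get_start_end_pos := by
  intro text triple system _ _
  unfold Spec_get_start_end_pos
  intro hD
  have e0 : PySem.List.pyGetD triple 0 "" = triple.getD 0 "" := by
    simp [pysem]
  have e2 : PySem.List.pyGetD triple 2 "" = triple.getD 2 "" := by
    simp [pysem]
  have hD' : ¬ pvLostMatch (PySem.Str.split₀ text)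
      (PySem.Str.split₀ (PySem.List.pyGetD triple 0 ""))
      (PySem.Str.split₀ (PySem.List.pyGetD triple 2 "")) := by
    rw [e0, e2]
    exact hD
  exact pvMain (PySem.Str.split₀ text)
    (PySem.Str.split₀ (PySem.List.pyGetD triple 0 ""))
    (PySem.Str.split₀ (PySem.List.pyGetD triple 2 "")) system hD'

theorem get_start_end_pos_changed : Claim_changed_get_start_end_pos := by
  unfold Claim_changed_get_start_end_pos; decide

theorem get_start_end_pos_tight : Claim_exact_get_start_end_pos := by
  intro text triple system _ _ hD
  have e0 : PySem.List.pyGetD triple 0 "" = triple.getD 0 "" := by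
    simp [pysem]
  have e2 : PySem.List.pyGetD triple 2 "" = triple.getD 2 "" := by
    simp [pysem]
  have hD' : pvLostMatch (PySem.Str.split₀ text)
      (PySem.Str.split₀ (PySem.List.pyGetD triple 0 ""))
      (PySem.Str.split₀ (PySem.List.pyGetD triple 2 "")) := by
    rw [e0, e2]
    exact hD
  exact pvMainNe (PySem.Str.split₀ text)
    (PySem.Str.split₀ (PySem.List.pyGetD triple 0 ""))
    (PySem.Str.split₀ (PySem.List.pyGetD triple 2 "")) system hD'
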